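-- pv_equiv track=rewrite | github.com/Vulmatch/Vulmatch | extract_sig/extract_insn_from_bin_lib.py | group_by_block
-- ===== SOURCE A (Python) =====
-- def group_by_block(bin_insns,block_addrs):
--  blocks={}
--  #bp()
--  for each_map in bin_insns:
--    splitted_blocks=find_affliate_block(each_map,block_addrs)
--    for splitted_block in splitted_blocks:
--      if splitted_block not in blocks:
--       blocks[splitted_block]={}
--       blocks[splitted_block][splitted_blocks[splitted_block][0]]=splitted_blocks[splitted_block][1]
--      else:
--       blocks[splitted_block][splitted_blocks[splitted_block][0]]=splitted_blocks[splitted_block][1]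
--
--  return blocks
--
-- def find_affliate_block(each_map,block_addrs):
--  splitted_blocks={}
--  for insn_addr in each_map:
--
--   for block in block_addrs:
--     if insn_addr in block_addrs[block]:
--      if block not in splitted_blocks:
--       splitted_blocks[block]=(insn_addr,[each_map[insn_addr]])
--      else:
--       splitted_blocks[block][1].append(each_map[insn_addr])
--      break
--
--  return splitted_blocks
-- ===== SOURCE B (Python) =====
-- def group_by_block(bin_insns, block_addrs):
--     # Reverse index: each address -> first block (in dict order) whose list contains it.
--     addr_to_block = {}
--     for block, addrs in block_addrs.items():
--         for a in addrs:
--             addr_to_block.setdefault(a, block)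
--     blocks = {}
--     for each_map in bin_insns:
--         per_block = {}
--         for insn_addr, val in each_map.items():
--             b = addr_to_block.get(insn_addr)
--             if b is None:
--                 continue
--             first, vals = per_block.get(b, (insn_addr, []))
--             per_block[b] = (first, vals + [val])
--         for b, (first, vals) in per_block.items():
--             inner = blocks.get(b, {})
--             inner[first] = vals
--             blocks[b] = inner
--     return blocks
-- ===== Notes on version B (the rewrite author's own statement) =====
-- stated objective: faster
-- what changed: B precomputes a reverse dict addr->block (first block in order wins) once and groups each instruction with an O(1) lookup, instead of A's linear scan over all blocks for every instruction of every map.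
import Mathlib
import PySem

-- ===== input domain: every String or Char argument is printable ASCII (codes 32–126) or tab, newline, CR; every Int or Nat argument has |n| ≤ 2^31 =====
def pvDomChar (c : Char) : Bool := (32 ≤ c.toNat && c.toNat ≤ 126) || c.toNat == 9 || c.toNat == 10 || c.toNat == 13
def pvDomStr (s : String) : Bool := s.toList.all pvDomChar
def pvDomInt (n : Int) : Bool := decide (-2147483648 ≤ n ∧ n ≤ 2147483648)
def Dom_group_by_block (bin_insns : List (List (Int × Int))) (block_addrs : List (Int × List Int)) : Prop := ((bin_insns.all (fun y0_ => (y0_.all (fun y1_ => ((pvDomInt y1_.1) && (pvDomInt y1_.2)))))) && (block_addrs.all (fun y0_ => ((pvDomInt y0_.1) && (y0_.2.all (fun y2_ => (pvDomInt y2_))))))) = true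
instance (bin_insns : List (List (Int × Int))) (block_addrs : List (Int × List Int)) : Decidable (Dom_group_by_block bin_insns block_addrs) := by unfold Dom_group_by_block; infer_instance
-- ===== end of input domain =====

-- B replaces A's per-instruction linear scan of all blocks with a reverse dict addr→block
-- built once (asymptotically faster); both return the same dict, same insertion order.

-- ===== PORT A =====
-- A's find_affliate_block: for each insn_addr (in dict order), scan the blocks in order and
-- take the FIRST block whose address list contains it (the `break`); record (first insn addr
-- hit, list of values) under that block.  Python's `for k in d:` with `d[k]` lookups over a
-- dict is ported as iterating `d.items` — exact, since dict keys are unique.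
def find_affliate_block (each_map : PySem.Dict Int Int) (block_addrs : PySem.Dict Int (List Int)) :
    PySem.Dict Int (Int × List Int) :=
  each_map.items.foldl
    (fun splitted_blocks item =>
      match block_addrs.items.find? (fun block => block.2.contains item.1) with
      | none => splitted_blocks
      | some block =>
        match splitted_blocks.get? block.1 with
        | none => splitted_blocks.insert block.1 (item.1, [item.2])
        | some p => splitted_blocks.insert block.1 (p.1, p.2 ++ [item.2]))
    PySem.Dict.empty

def group_by_block (bin_insns : List (List (Int × Int))) (block_addrs : List (Int × List Int)) : List (Int × List (Int × List Int)) :=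
  (bin_insns.foldl
    (fun blocks each_map =>
      (find_affliate_block (PySem.Dict.ofList each_map) (PySem.Dict.ofList block_addrs)).items.foldl
        (fun blocks sb =>
          -- Python's `if splitted_block not in blocks:` branch first creates {}, then both
          -- branches do blocks[splitted_block][first_addr] = value_list
          match blocks.get? sb.1 with
          | none => blocks.insert sb.1 (PySem.Dict.empty.insert sb.2.1 sb.2.2)
          | some d => blocks.insert sb.1 (d.insert sb.2.1 sb.2.2))
        blocks)
    PySem.Dict.empty).items.map (fun p => (p.1, p.2.items))

-- ===== PORT B =====
-- reverse index: each address → first block (in dict order) whose list contains it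
def pvAddrToBlock (block_addrs : PySem.Dict Int (List Int)) : PySem.Dict Int Int :=
  block_addrs.items.foldl
    (fun a2b blk => blk.2.foldl (fun a2b a => a2b.setdefault a blk.1) a2b)
    PySem.Dict.empty

-- one map's instructions grouped by block via an O(1) reverse-dict lookup per instruction
def pvPerBlock (a2b : PySem.Dict Int Int) (each_map : PySem.Dict Int Int) :
    PySem.Dict Int (Int × List Int) :=
  each_map.items.foldl
    (fun per_block item =>
      match a2b.get? item.1 with
      | none => per_block
      | some b =>
        let fv := per_block.getD b (item.1, [])
        per_block.insert b (fv.1, fv.2 ++ [item.2]))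
    PySem.Dict.empty

def group_by_block_alt (bin_insns : List (List (Int × Int))) (block_addrs : List (Int × List Int)) : List (Int × List (Int × List Int)) :=
  (bin_insns.foldl
    (fun blocks each_map =>
      (pvPerBlock (pvAddrToBlock (PySem.Dict.ofList block_addrs)) (PySem.Dict.ofList each_map)).items.foldl
        (fun blocks bfv =>
          blocks.insert bfv.1 ((blocks.getD bfv.1 PySem.Dict.empty).insert bfv.2.1 bfv.2.2))
        blocks)
    PySem.Dict.empty).items.map (fun p => (p.1, p.2.items))

-- ===== PRECONDITION & SPEC =====
def Spec_group_by_block (bin_insns : List (List (Int × Int))) (block_addrs : List (Int × List Int)) (out : List (Int × List (Int × List Int))) : Prop := out = group_by_block_alt bin_insns block_addrs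
instance (bin_insns : List (List (Int × Int))) (block_addrs : List (Int × List Int)) (out : List (Int × List (Int × List Int))) : Decidable (Spec_group_by_block bin_insns block_addrs out) := by unfold Spec_group_by_block; infer_instance

-- ===== CLAIM (what is proved, stated in full; the proofs are below) =====
def Claim_equal_group_by_block : Prop := ∀ (bin_insns : List (List (Int × Int))) (block_addrs : List (Int × List Int)), Dom_group_by_block bin_insns block_addrs → Spec_group_by_block bin_insns block_addrs (group_by_block bin_insns block_addrs)

-- ===== LEMMAS AND PROOFS =====

theorem pv_find?_eq_none_of_not_contains {κ ν : Type} [BEq κ] [LawfulBEq κ] (d : PySem.Dict κ ν) (a : κ)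
    (h : ¬ d.contains a = true) : List.find? (fun p => p.1 == a) d.items = none := by
  rw [List.find?_eq_none]
  intro p hp
  simp only [PySem.Dict.contains, List.any_eq_true, not_exists] at h
  intro hc
  exact h p ⟨hp, hc⟩

theorem pv_get?_setdefault {κ ν : Type} [BEq κ] [LawfulBEq κ] (d : PySem.Dict κ ν) (a : κ) (b : ν) (x : κ) :
    (d.setdefault a b).get? x = (d.get? x).or (if a == x then some b else none) := by
  unfold PySem.Dict.setdefault
  by_cases h : d.contains a = true
  · simp only [h, if_true]
    by_cases hax : a = x
    · subst hax
      simp only [PySem.Dict.contains, List.any_eq_true] at h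
      obtain ⟨p, hp, he⟩ := h
      cases hg : d.get? a with
      | none =>
        exfalso
        simp only [PySem.Dict.get?, Option.map_eq_none_iff, List.find?_eq_none] at hg
        exact hg p hp he
      | some v => simp
    · simp [beq_iff_eq, hax]
  · simp only [h]
    simp only [PySem.Dict.get?]
    by_cases hax : a = x
    · subst hax
      simp [pv_find?_eq_none_of_not_contains d a h]
    · simp [beq_iff_eq, hax]

-- folding setdefault over one block's address list
theorem pv_get?_foldl_setdefault (addrs : List Int) (b : Int) (d : PySem.Dict Int Int) (x : Int) :
    (addrs.foldl (fun a2b a => a2b.setdefault a b) d).get? x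
      = (d.get? x).or (if addrs.contains x then some b else none) := by
  induction addrs generalizing d with
  | nil => simp
  | cons a rest ih =>
    simp only [List.foldl_cons, ih, pv_get?_setdefault, Option.or_assoc, List.contains_cons]
    by_cases hax : a = x
    · subst hax; by_cases hr : a ∈ rest <;> simp [hr]
    · by_cases hr : x ∈ rest <;> simp [hax, hr, Ne.symm hax]

-- the reverse dict answers exactly what A's first-match scan over the blocks answers
theorem pv_get?_foldl_blocks (ps : List (Int × List Int)) (d : PySem.Dict Int Int) (x : Int) :
    (ps.foldl (fun a2b blk => blk.2.foldl (fun a2b a => a2b.setdefault a blk.1) a2b) d).get? x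
      = (d.get? x).or ((ps.find? (fun blk => blk.2.contains x)).map (·.1)) := by
  induction ps generalizing d with
  | nil => simp
  | cons blk rest ih =>
    simp only [List.foldl_cons, ih, pv_get?_foldl_setdefault, Option.or_assoc]
    rw [List.find?_cons]
    by_cases hm : x ∈ blk.2 <;> simp [hm]

theorem pv_addrToBlock_get? (ba : PySem.Dict Int (List Int)) (x : Int) :
    (pvAddrToBlock ba).get? x = (ba.items.find? (fun blk => blk.2.contains x)).map (·.1) := by
  unfold pvAddrToBlock
  rw [pv_get?_foldl_blocks]
  simp [PySem.Dict.empty, PySem.Dict.get?]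

-- the O(1)-lookup grouping of one map equals A's scan-based grouping
theorem pv_perBlock_eq (ba : PySem.Dict Int (List Int)) (em : PySem.Dict Int Int) :
    pvPerBlock (pvAddrToBlock ba) em = find_affliate_block em ba := by
  unfold pvPerBlock find_affliate_block
  congr 1
  funext pb item
  rw [pv_addrToBlock_get?]
  cases hf : ba.items.find? (fun blk => blk.2.contains item.1) with
  | none => simp
  | some blk =>
    simp only [Option.map_some]
    cases hg : pb.get? blk.1 with
    | none => simp [PySem.Dict.getD, hg]
    | some p => simp [PySem.Dict.getD, hg]

-- ===== VERDICT (by name: the statement is the Claim_ definition above) =====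
theorem group_by_block_spec : Claim_equal_group_by_block := by
  intro bin_insns block_addrs _
  show group_by_block bin_insns block_addrs = group_by_block_alt bin_insns block_addrs
  unfold group_by_block group_by_block_alt
  have hinner : (fun (blocks : PySem.Dict Int (PySem.Dict Int (List Int))) (sb : Int × (Int × List Int)) =>
        match blocks.get? sb.1 with
        | none => blocks.insert sb.1 (PySem.Dict.empty.insert sb.2.1 sb.2.2)
        | some d => blocks.insert sb.1 (d.insert sb.2.1 sb.2.2))
      = (fun blocks bfv => blocks.insert bfv.1 ((blocks.getD bfv.1 PySem.Dict.empty).insert bfv.2.1 bfv.2.2)) := by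
    funext blocks sb
    cases hg : blocks.get? sb.1 with
    | none => simp [PySem.Dict.getD, hg]
    | some d => simp [PySem.Dict.getD, hg]
  have hf : (fun (blocks : PySem.Dict Int (PySem.Dict Int (List Int))) (each_map : List (Int × Int)) =>
        List.foldl
          (fun blocks sb =>
            match blocks.get? sb.1 with
            | none => blocks.insert sb.1 (PySem.Dict.empty.insert sb.2.1 sb.2.2)
            | some d => blocks.insert sb.1 (d.insert sb.2.1 sb.2.2))
          blocks (find_affliate_block (PySem.Dict.ofList each_map) (PySem.Dict.ofList block_addrs)).items)
      = (fun blocks each_map =>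
        List.foldl
          (fun blocks bfv => blocks.insert bfv.1 ((blocks.getD bfv.1 PySem.Dict.empty).insert bfv.2.1 bfv.2.2))
          blocks (pvPerBlock (pvAddrToBlock (PySem.Dict.ofList block_addrs)) (PySem.Dict.ofList each_map)).items) := by
    funext blocks each_map
    rw [pv_perBlock_eq, hinner]
  rw [hf]
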